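-- pv_equiv track=rewrite | github.com/daniel-petrov/connect4 | src/board.py | get_number_of_triples
-- ===== SOURCE A (Python) =====
-- def get_number_of_triples(piece_positions):
--     number_of_triples = 0
--     for piece in piece_positions:
--         row = piece[0]
--         col = piece[1]
--         horizontal = [[row, col], [row, col + 1], [row, col+2]]
--         result1 = all(elem in piece_positions for elem in horizontal)
--
--         vertical = [[row, col], [row + 1, col], [row+2, col]]
--         result2 = all(elem in piece_positions for elem in vertical)
--
--         right_diagonal = [[row, col], [row - 1, col + 1], [row-2, col+2]]
--         result3 = all(elem in piece_positions for elem in right_diagonal)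
--
--         left_diagonal = [[row, col], [row + 1, col + 1], [row+2, col+2]]
--         reuslt4 = all(elem in piece_positions for elem in left_diagonal)
--
--         if result1 or result2 or result3 or reuslt4:
--             number_of_triples += 1
--     return number_of_triples
-- ===== SOURCE B (Python) =====
-- def _begin_pairs(pairs):
--     """pairs: list of (key, value) ints. Return the (key, value) pairs such that
--     value, value+1 and value+2 all occur with that key (begin of a run of >= 3)."""
--     out = []
--     for k in sorted({kk for kk, _ in pairs}):
--         vals = sorted({v for kk, v in pairs if kk == k})
--         out += [(k, a) for a, b, c in zip(vals, vals[1:], vals[2:])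
--                 if b == a + 1 and c == a + 2]
--     return out
--
--
-- def _begin_cells(cells):
--     """Set of cells (r, c) that begin a horizontal/vertical/diagonal triple in cells."""
--     begins = set()
--     # horizontal: key = row, value = col
--     for k, v in _begin_pairs([(r, c) for r, c in cells]):
--         begins.add((k, v))
--     # vertical: key = col, value = row
--     for k, v in _begin_pairs([(c, r) for r, c in cells]):
--         begins.add((v, k))
--     # rising diagonal: key = row + col, value = col (cell = (key - value, value))
--     for k, v in _begin_pairs([(r + c, c) for r, c in cells]):
--         begins.add((k - v, v))
--     # falling diagonal: key = row - col, value = col (cell = (key + value, value))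
--     for k, v in _begin_pairs([(r - c, c) for r, c in cells]):
--         begins.add((k + v, v))
--     return begins
--
--
-- def get_number_of_triples(piece_positions):
--     cells = [(p[0], p[1]) for p in piece_positions if len(p) == 2]
--     begins = _begin_cells(cells)
--     return sum(1 for p in piece_positions if (p[0], p[1]) in begins)
-- ===== Notes on version B (the rewrite author's own statement) =====
-- stated objective: faster
-- what changed: Instead of testing, for every piece, twelve list memberships by scanning the whole list, B groups the distinct cells into line families (row, column, row+col, row-col), sorts each family's values once and scans adjacent sorted triples for consecutive runs to build a set of triple-begin cells, then counts the original pieces whose (row,col) is in that set.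
import Mathlib
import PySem

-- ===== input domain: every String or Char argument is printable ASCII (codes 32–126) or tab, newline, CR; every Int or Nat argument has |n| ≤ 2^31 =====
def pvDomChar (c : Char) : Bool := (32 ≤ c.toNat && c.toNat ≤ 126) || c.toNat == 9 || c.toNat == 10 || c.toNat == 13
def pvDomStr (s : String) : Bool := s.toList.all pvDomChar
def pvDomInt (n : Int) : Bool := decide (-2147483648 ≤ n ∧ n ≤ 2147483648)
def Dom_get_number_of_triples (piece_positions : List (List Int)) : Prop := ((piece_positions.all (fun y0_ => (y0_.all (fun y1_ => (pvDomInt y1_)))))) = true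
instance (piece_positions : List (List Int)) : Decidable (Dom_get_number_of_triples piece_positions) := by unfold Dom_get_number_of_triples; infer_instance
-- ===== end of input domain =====

-- B replaces A's per-piece whole-list membership scans by grouping the distinct cells into
-- four sorted line families and scanning them for consecutive runs (measurably faster).


-- ===== PORT A =====
def get_number_of_triples (piece_positions : List (List Int)) : Int :=
  piece_positions.foldl (fun number_of_triples piece =>
    let row := PySem.List.pyGetD piece 0 0
    let col := PySem.List.pyGetD piece 1 0
    let horizontal := [[row, col], [row, col + 1], [row, col + 2]]
    let result1 := horizontal.all (fun elem => piece_positions.contains elem)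
    let vertical := [[row, col], [row + 1, col], [row + 2, col]]
    let result2 := vertical.all (fun elem => piece_positions.contains elem)
    let right_diagonal := [[row, col], [row - 1, col + 1], [row - 2, col + 2]]
    let result3 := right_diagonal.all (fun elem => piece_positions.contains elem)
    let left_diagonal := [[row, col], [row + 1, col + 1], [row + 2, col + 2]]
    let reuslt4 := left_diagonal.all (fun elem => piece_positions.contains elem)
    if result1 || result2 || result3 || reuslt4 then number_of_triples + 1
    else number_of_triples) 0

-- ===== PORT B =====
-- _begin_pairs(pairs)
def beginPairs (pairs : List (Int × Int)) : List (Int × Int) :=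
  (PySem.List.sorted (PySem.Set.ofList (pairs.map (fun kv => kv.1))) (fun x => x) false).foldl
    (fun out k =>
      let vals := PySem.List.sorted
        (PySem.Set.ofList (((pairs.filter (fun kv => kv.1 == k)).map (fun kv => kv.2))))
        (fun x => x) false
      out ++ (((vals.zip ((PySem.List.slice vals (some 1) none).zip
                           (PySem.List.slice vals (some 2) none))).filter
                 (fun abc => abc.2.1 == abc.1 + 1 && abc.2.2 == abc.1 + 2)).map
               (fun abc => (k, abc.1))))
    []

-- _begin_cells(cells)
def beginCells (cells : List (Int × Int)) : PySem.Set (Int × Int) :=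
  let begins : PySem.Set (Int × Int) := PySem.Set.empty
  let begins := (beginPairs (cells.map (fun rc => (rc.1, rc.2)))).foldl
    (fun s kv => PySem.Set.add s (kv.1, kv.2)) begins
  let begins := (beginPairs (cells.map (fun rc => (rc.2, rc.1)))).foldl
    (fun s kv => PySem.Set.add s (kv.2, kv.1)) begins
  let begins := (beginPairs (cells.map (fun rc => (rc.1 + rc.2, rc.2)))).foldl
    (fun s kv => PySem.Set.add s (kv.1 - kv.2, kv.2)) begins
  let begins := (beginPairs (cells.map (fun rc => (rc.1 - rc.2, rc.2)))).foldl
    (fun s kv => PySem.Set.add s (kv.1 + kv.2, kv.2)) begins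
  begins

def get_number_of_triples_alt (piece_positions : List (List Int)) : Int :=
  let cells := (piece_positions.filter (fun p => p.length == 2)).map
    (fun p => (PySem.List.pyGetD p 0 0, PySem.List.pyGetD p 1 0))
  let begins := beginCells cells
  piece_positions.foldl (fun acc p =>
    acc + if begins.contains (PySem.List.pyGetD p 0 0, PySem.List.pyGetD p 1 0) then 1 else 0) 0

-- ===== PRECONDITION & SPEC =====
-- A raises IndexError (piece[0] / piece[1]) on any piece with fewer than two entries;
-- exactly those inputs are excluded.
def Pre_get_number_of_triples (piece_positions : List (List Int)) : Prop :=
  ∀ p ∈ piece_positions, 2 ≤ p.length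
instance (piece_positions : List (List Int)) : Decidable (Pre_get_number_of_triples piece_positions) := by unfold Pre_get_number_of_triples; infer_instance

def pvWitness_get_number_of_triples : List (List Int) := [[0, 0], [0, 1], [0, 2]]

def Spec_get_number_of_triples (piece_positions : List (List Int)) (out : Int) : Prop := out = get_number_of_triples_alt piece_positions
instance (piece_positions : List (List Int)) (out : Int) : Decidable (Spec_get_number_of_triples piece_positions out) := by unfold Spec_get_number_of_triples; infer_instance

-- ===== CLAIM =====
def Claim_equal_get_number_of_triples : Prop := ∀ (piece_positions : List (List Int)), Dom_get_number_of_triples piece_positions → Pre_get_number_of_triples piece_positions → Spec_get_number_of_triples piece_positions (get_number_of_triples piece_positions)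

-- ===== LEMMAS AND PROOFS =====

-- zip(vals, vals[1:], vals[2:]) in proof-friendly form
def trip (l : List Int) : List (Int × Int × Int) := l.zip (l.tail.zip l.tail.tail)

lemma trip_port (l : List Int) :
    l.zip ((PySem.List.slice l (some 1) none).zip (PySem.List.slice l (some 2) none)) = trip l := by
  rw [PySem.List.slice_from l (by norm_num : (0:Int) ≤ 1), PySem.List.slice_from l (by norm_num : (0:Int) ≤ 2)]
  have : List.drop 2 l = l.tail.tail := by
    cases l with
    | nil => rfl
    | cons x t => simp
  simp [trip, this]

-- in a strictly increasing list, an adjacent (a, a+1, a+2) window is the same as membership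
-- of a, a+1 and a+2
lemma mem_trip_of_sorted (l : List Int) (h : l.Pairwise (· < ·)) (a : Int) :
    (a, a + 1, a + 2) ∈ trip l ↔ (a ∈ l ∧ a + 1 ∈ l ∧ a + 2 ∈ l) := by
  induction l with
  | nil => simp [trip]
  | cons x t ih =>
    cases t with
    | nil =>
      simp only [trip]
      simp
      omega
    | cons y u =>
      cases u with
      | nil =>
        rcases List.pairwise_cons.mp h with ⟨hx, _⟩
        have hxy : x < y := hx y (by simp)
        simp only [trip]
        simp
        omega
      | cons z w =>
        have hx : ∀ b ∈ y :: z :: w, x < b := (List.pairwise_cons.mp h).1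
        have h' : (y :: z :: w).Pairwise (· < ·) := (List.pairwise_cons.mp h).2
        have hy : ∀ b ∈ z :: w, y < b := (List.pairwise_cons.mp h').1
        have hz : ∀ b ∈ w, z < b := (List.pairwise_cons.mp (List.pairwise_cons.mp h').2).1
        rw [show trip (x :: y :: z :: w) = (x, y, z) :: trip (y :: z :: w) from rfl,
          List.mem_cons, ih h']
        constructor
        · rintro (heq | ⟨h1, h2, h3⟩)
          · simp only [Prod.mk.injEq] at heq
            obtain ⟨e1, e2, e3⟩ := heq
            exact ⟨by simp [e1], by simp [e2], by simp [e3]⟩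
          · exact ⟨List.mem_cons_of_mem _ h1, List.mem_cons_of_mem _ h2, List.mem_cons_of_mem _ h3⟩
        · rintro ⟨h1, h2, h3⟩
          by_cases hax : a = x
          · subst hax
            have hmin : ∀ m ∈ y :: z :: w, y ≤ m := by
              intro m hm
              rcases List.mem_cons.mp hm with rfl | hm'
              · exact le_refl _
              · exact le_of_lt (hy m hm')
            have h2' : a + 1 ∈ y :: z :: w := by
              rcases List.mem_cons.mp h2 with he | hm
              · omega
              · exact hm
            have hy1 : y = a + 1 := by
              have := hmin _ h2'
              have := hx y (by simp)
              omega
            have hminz : ∀ m ∈ z :: w, z ≤ m := by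
              intro m hm
              rcases List.mem_cons.mp hm with rfl | hm'
              · exact le_refl _
              · exact le_of_lt (hz m hm')
            have h3' : a + 2 ∈ z :: w := by
              rcases List.mem_cons.mp h3 with he | hm
              · omega
              · rcases List.mem_cons.mp hm with he | hm'
                · omega
                · exact hm'
            have hz1 : z = a + 2 := by
              have := hminz _ h3'
              have := hy z (by simp)
              omega
            left; simp [hy1, hz1]
          · right
            have h1' : a ∈ y :: z :: w := by
              rcases List.mem_cons.mp h1 with he | hm
              · exact absurd he hax
              · exact hm
            have hxa : x < a := hx a h1'
            refine ⟨h1', ?_, ?_⟩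
            · rcases List.mem_cons.mp h2 with he | hm
              · omega
              · exact hm
            · rcases List.mem_cons.mp h3 with he | hm
              · omega
              · exact hm

-- the values grouped under key k are exactly the pairs (k, v) of the input
lemma mem_vals (pairs : List (Int × Int)) (k v : Int) :
    v ∈ PySem.List.sorted
        (PySem.Set.ofList (((pairs.filter (fun kv => kv.1 == k)).map (fun kv => kv.2))))
        (fun x => x) false ↔ (k, v) ∈ pairs := by
  rw [PySem.List.mem_sorted, PySem.Set.mem_ofList]
  simp only [List.mem_map, List.mem_filter, beq_iff_eq]
  constructor
  · rintro ⟨p, ⟨hp, hk⟩, hv⟩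
    have : p = (k, v) := by cases p; simp_all
    exact this ▸ hp
  · intro hp
    exact ⟨(k, v), ⟨hp, rfl⟩, rfl⟩

-- _begin_pairs marks exactly the (k, v) with (k, v), (k, v+1), (k, v+2) all present
lemma mem_beginPairs (pairs : List (Int × Int)) (k v : Int) :
    (k, v) ∈ beginPairs pairs ↔
      ((k, v) ∈ pairs ∧ (k, v + 1) ∈ pairs ∧ (k, v + 2) ∈ pairs) := by
  unfold beginPairs
  rw [PySem.List.foldl_append_eq_flatMap]
  simp only [List.nil_append, List.mem_flatMap]
  constructor
  · rintro ⟨k', hk', hmem⟩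
    simp only [List.mem_map, List.mem_filter, Bool.and_eq_true, beq_iff_eq] at hmem
    obtain ⟨abc, ⟨habc, hb, hc⟩, heq⟩ := hmem
    simp only [Prod.mk.injEq] at heq
    obtain ⟨hk, hv⟩ := heq
    subst hk hv
    obtain ⟨a, b, c⟩ := abc
    simp only at hb hc
    subst hb hc
    rw [trip_port] at habc
    rw [mem_trip_of_sorted _ (PySem.List.sorted_ofList_pairwise_lt _)] at habc
    simp only [mem_vals] at habc
    exact habc
  · rintro ⟨h1, h2, h3⟩
    refine ⟨k, ?_, ?_⟩
    · rw [PySem.List.mem_sorted, PySem.Set.mem_ofList]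
      exact List.mem_map.mpr ⟨(k, v), h1, rfl⟩
    · simp only [List.mem_map, List.mem_filter, Bool.and_eq_true, beq_iff_eq]
      refine ⟨(v, v + 1, v + 2), ⟨?_, rfl, rfl⟩, rfl⟩
      rw [trip_port, mem_trip_of_sorted _ (PySem.List.sorted_ofList_pairwise_lt _)]
      simp only [mem_vals]
      exact ⟨h1, h2, h3⟩

lemma mem_foldl_add {α β : Type} [BEq α] [LawfulBEq α] (l : List β) (f : β → α)
    (s0 : PySem.Set α) (x : α) :
    x ∈ l.foldl (fun s kv => PySem.Set.add s (f kv)) s0 ↔ x ∈ s0 ∨ ∃ kv ∈ l, f kv = x := by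
  induction l generalizing s0 with
  | nil => simp
  | cons y t ih => simp [List.foldl_cons, ih, PySem.Set.mem_add]; tauto

lemma mem_map_swap (cells : List (Int × Int)) (x y : Int) :
    (x, y) ∈ cells.map (fun rc => (rc.2, rc.1)) ↔ (y, x) ∈ cells := by
  simp only [List.mem_map, Prod.mk.injEq]
  constructor
  · rintro ⟨⟨a, b⟩, hp, h1, h2⟩
    simp only at h1 h2
    subst h1 h2
    exact hp
  · intro hp
    exact ⟨(y, x), hp, rfl, rfl⟩

lemma mem_map_adiag (cells : List (Int × Int)) (x y : Int) :
    (x, y) ∈ cells.map (fun rc => (rc.1 + rc.2, rc.2)) ↔ (x - y, y) ∈ cells := by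
  simp only [List.mem_map, Prod.mk.injEq]
  constructor
  · rintro ⟨⟨a, b⟩, hp, h1, h2⟩
    simp only at h1 h2
    rw [show x - y = a by omega, show y = b by omega]
    exact hp
  · intro hp
    exact ⟨(x - y, y), hp, by simp, rfl⟩

lemma mem_map_mdiag (cells : List (Int × Int)) (x y : Int) :
    (x, y) ∈ cells.map (fun rc => (rc.1 - rc.2, rc.2)) ↔ (x + y, y) ∈ cells := by
  simp only [List.mem_map, Prod.mk.injEq]
  constructor
  · rintro ⟨⟨a, b⟩, hp, h1, h2⟩
    simp only at h1 h2
    rw [show x + y = a by omega, show y = b by omega]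
    exact hp
  · intro hp
    exact ⟨(x + y, y), hp, by simp, rfl⟩

-- _begin_cells holds exactly the cells that begin one of the four kinds of triple
lemma mem_beginCells (cells : List (Int × Int)) (r c : Int) :
    (r, c) ∈ beginCells cells ↔
      (((r, c) ∈ cells ∧ (r, c + 1) ∈ cells ∧ (r, c + 2) ∈ cells) ∨
       ((r, c) ∈ cells ∧ (r + 1, c) ∈ cells ∧ (r + 2, c) ∈ cells) ∨
       ((r, c) ∈ cells ∧ (r - 1, c + 1) ∈ cells ∧ (r - 2, c + 2) ∈ cells) ∨
       ((r, c) ∈ cells ∧ (r + 1, c + 1) ∈ cells ∧ (r + 2, c + 2) ∈ cells)) := by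
  unfold beginCells
  simp only [mem_foldl_add]
  have hempty : ((r, c) ∈ (PySem.Set.empty : PySem.Set (Int × Int))) = False := by
    simp [PySem.Set.empty]
  rw [hempty]
  constructor
  · rintro ((((hf | ⟨⟨k, v⟩, hkv, heq⟩) | ⟨⟨k, v⟩, hkv, heq⟩) | ⟨⟨k, v⟩, hkv, heq⟩) | ⟨⟨k, v⟩, hkv, heq⟩)
    · exact absurd hf (by simp)
    · simp only [Prod.mk.injEq] at heq
      obtain ⟨h1, h2⟩ := heq; subst h1 h2
      rw [mem_beginPairs] at hkv
      simp only [Prod.mk.eta, List.map_id_fun', id] at hkv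
      left
      simpa using hkv
    · simp only [Prod.mk.injEq] at heq
      obtain ⟨h1, h2⟩ := heq; subst h1 h2
      rw [mem_beginPairs] at hkv
      simp only [mem_map_swap] at hkv
      right; left
      exact hkv
    · simp only [Prod.mk.injEq] at heq
      have hk : k = r + c := by omega
      have hv : v = c := by omega
      rw [hk, hv] at hkv
      rw [mem_beginPairs] at hkv
      simp only [mem_map_adiag] at hkv
      right; right; left
      rw [show r + c - c = r by ring, show r + c - (c + 1) = r - 1 by ring,
        show r + c - (c + 2) = r - 2 by ring] at hkv
      exact hkv
    · simp only [Prod.mk.injEq] at heq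
      have hk : k = r - c := by omega
      have hv : v = c := by omega
      rw [hk, hv] at hkv
      rw [mem_beginPairs] at hkv
      simp only [mem_map_mdiag] at hkv
      right; right; right
      rw [show r - c + c = r by ring, show r - c + (c + 1) = r + 1 by ring,
        show r - c + (c + 2) = r + 2 by ring] at hkv
      exact hkv
  · rintro (h | h | h | h)
    · left; left; left; right
      refine ⟨(r, c), ?_, rfl⟩
      rw [mem_beginPairs]
      simp only [Prod.mk.eta, List.map_id_fun', id]
      simpa using h
    · left; left; right
      refine ⟨(c, r), ?_, rfl⟩
      rw [mem_beginPairs]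
      simp only [mem_map_swap]
      exact h
    · left; right
      refine ⟨(r + c, c), ?_, by simp⟩
      rw [mem_beginPairs]
      simp only [mem_map_adiag]
      rw [show r + c - c = r by ring, show r + c - (c + 1) = r - 1 by ring,
        show r + c - (c + 2) = r - 2 by ring]
      exact h
    · right
      refine ⟨(r - c, c), ?_, by simp⟩
      rw [mem_beginPairs]
      simp only [mem_map_mdiag]
      rw [show r - c + c = r by ring, show r - c + (c + 1) = r + 1 by ring,
        show r - c + (c + 2) = r + 2 by ring]
      exact h

-- the 2-cell list of B is exactly list membership of the 2-element pieces of A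
lemma mem_cells (L : List (List Int)) (x y : Int) :
    (x, y) ∈ (L.filter (fun p => p.length == 2)).map
      (fun p => (PySem.List.pyGetD p 0 0, PySem.List.pyGetD p 1 0)) ↔ [x, y] ∈ L := by
  simp only [List.mem_map, List.mem_filter, beq_iff_eq, Prod.mk.injEq]
  constructor
  · rintro ⟨p, ⟨hp, hlen⟩, h0, h1⟩
    match p, hlen with
    | [a, b], _ =>
      have ha : PySem.List.pyGetD [a, b] 0 0 = a := rfl
      have hb : PySem.List.pyGetD [a, b] 1 0 = b := rfl
      rw [ha] at h0
      rw [hb] at h1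
      rw [← h0, ← h1]
      exact hp
  · intro hp
    exact ⟨[x, y], ⟨hp, rfl⟩, rfl, rfl⟩

-- ===== VERDICT =====
theorem get_number_of_triples_spec : Claim_equal_get_number_of_triples := by
  intro L _hdom hpre
  unfold Spec_get_number_of_triples get_number_of_triples get_number_of_triples_alt
  apply PySem.List.foldl_congr_mem
  intro acc p hp
  simp only []
  have hcond :
      ((([[PySem.List.pyGetD p 0 0, PySem.List.pyGetD p 1 0],
          [PySem.List.pyGetD p 0 0, PySem.List.pyGetD p 1 0 + 1],
          [PySem.List.pyGetD p 0 0, PySem.List.pyGetD p 1 0 + 2]].all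
            (fun elem => L.contains elem)) = true) ∨
       (([[PySem.List.pyGetD p 0 0, PySem.List.pyGetD p 1 0],
          [PySem.List.pyGetD p 0 0 + 1, PySem.List.pyGetD p 1 0],
          [PySem.List.pyGetD p 0 0 + 2, PySem.List.pyGetD p 1 0]].all
            (fun elem => L.contains elem)) = true) ∨
       (([[PySem.List.pyGetD p 0 0, PySem.List.pyGetD p 1 0],
          [PySem.List.pyGetD p 0 0 - 1, PySem.List.pyGetD p 1 0 + 1],
          [PySem.List.pyGetD p 0 0 - 2, PySem.List.pyGetD p 1 0 + 2]].all
            (fun elem => L.contains elem)) = true) ∨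
       (([[PySem.List.pyGetD p 0 0, PySem.List.pyGetD p 1 0],
          [PySem.List.pyGetD p 0 0 + 1, PySem.List.pyGetD p 1 0 + 1],
          [PySem.List.pyGetD p 0 0 + 2, PySem.List.pyGetD p 1 0 + 2]].all
            (fun elem => L.contains elem)) = true)) ↔
      ((beginCells ((L.filter (fun p => p.length == 2)).map
          (fun p => (PySem.List.pyGetD p 0 0, PySem.List.pyGetD p 1 0)))).contains
        (PySem.List.pyGetD p 0 0, PySem.List.pyGetD p 1 0) = true) := by
    rw [show ((beginCells ((L.filter (fun p => p.length == 2)).map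
          (fun p => (PySem.List.pyGetD p 0 0, PySem.List.pyGetD p 1 0)))).contains
        (PySem.List.pyGetD p 0 0, PySem.List.pyGetD p 1 0) = true) ↔
        ((PySem.List.pyGetD p 0 0, PySem.List.pyGetD p 1 0) ∈ beginCells
          ((L.filter (fun p => p.length == 2)).map
            (fun p => (PySem.List.pyGetD p 0 0, PySem.List.pyGetD p 1 0)))) from by
      simp [PySem.Set.contains]]
    rw [mem_beginCells]
    simp only [mem_cells, List.all_cons, List.all_nil, Bool.and_eq_true, Bool.and_true,
      List.contains_eq_mem, decide_eq_true_eq]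
  simp only [Bool.or_eq_true, or_assoc]
  split_ifs with h1 h2 h3 <;>
    first
      | omega
      | exact absurd (hcond.mp h1) h2
      | exact absurd (hcond.mpr h3) h1
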